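-- pv_equiv track=rewrite | github.com/naratip69/bioinfo | protein2vec.py | proteinTokenizer
-- ===== SOURCE A (Python) =====
-- def proteinTokenizer(seq):
--     out = []
--     char2num = {'a':0,'b':1,'c':2,'d':3,'e':4,'f':5,'g':6}
--     for i in range(len(seq)):
--         if(i+2 >= len(seq) or (not ((seq[i] in char2num) and (seq[i+1] in char2num) and (seq[i+2] in char2num)))):
--             out.append(343)
--         else:
--             out.append(( char2num[seq[i+2]]*49 +char2num[seq[i+1]]*7+ char2num[seq[i]] ))
--     return out
-- ===== SOURCE B (Python) =====
-- def proteinTokenizer(seq):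
--     char2num = {'a':0,'b':1,'c':2,'d':3,'e':4,'f':5,'g':6}
--     out = []
--     n1 = None  # code of the character one position to the right (None = absent or non-code)
--     n2 = None  # code of the character two positions to the right
--     for ch in reversed(seq):
--         n0 = char2num.get(ch)
--         if n0 is None or n1 is None or n2 is None:
--             out.append(343)
--         else:
--             out.append(n2 * 49 + n1 * 7 + n0)
--         n2 = n1
--         n1 = n0
--     out.reverse()
--     return out
-- ===== Notes on version B (the rewrite author's own statement) =====
-- stated objective: faster
-- what changed: Replaces A's forward index loop (per-index bounds check, three dict membership tests and three indexed lookups per position) by a single backward pass that keeps two rolling registers with the codes of the next two characters, does one dict .get per character, appends each token and reverses once at the end.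
import Mathlib
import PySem

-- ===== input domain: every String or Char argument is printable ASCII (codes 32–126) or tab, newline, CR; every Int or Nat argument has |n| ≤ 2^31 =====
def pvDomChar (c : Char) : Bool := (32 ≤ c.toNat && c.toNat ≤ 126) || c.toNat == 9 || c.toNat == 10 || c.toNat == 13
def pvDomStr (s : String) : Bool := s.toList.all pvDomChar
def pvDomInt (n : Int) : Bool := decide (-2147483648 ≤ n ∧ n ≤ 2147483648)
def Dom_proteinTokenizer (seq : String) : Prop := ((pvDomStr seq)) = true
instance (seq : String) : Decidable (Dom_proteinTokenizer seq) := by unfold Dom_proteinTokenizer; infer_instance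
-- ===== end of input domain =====

-- B replaces A's forward index loop (bounds check + lookups at i, i+1, i+2) by a single
-- backward pass with two rolling registers, reversed at the end; objective: faster
-- (constant factor, measured).


-- the dict {'a':0,…,'g':6} both Pythons build
def pvChar2num : PySem.Dict Char Int :=
  PySem.Dict.ofList [('a',0),('b',1),('c',2),('d',3),('e',4),('f',5),('g',6)]

-- ===== PORT A =====
def proteinTokenizer (seq : String) : List Int :=
  (PySem.List.pyRange 0 (seq.toList.length : Int) 1).foldl (fun out i =>
    if i + 2 ≥ (seq.toList.length : Int) ∨
       ¬((pvChar2num.get? (PySem.List.pyGetD seq.toList i ' ')).isSome = true ∧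
         (pvChar2num.get? (PySem.List.pyGetD seq.toList (i+1) ' ')).isSome = true ∧
         (pvChar2num.get? (PySem.List.pyGetD seq.toList (i+2) ' ')).isSome = true)
    then out ++ [343]
    else out ++ [pvChar2num.getD (PySem.List.pyGetD seq.toList (i+2) ' ') 0 * 49 +
                 pvChar2num.getD (PySem.List.pyGetD seq.toList (i+1) ' ') 0 * 7 +
                 pvChar2num.getD (PySem.List.pyGetD seq.toList i ' ') 0]) []

-- ===== PORT B =====
-- B's token from the current code and the two rolling registers
def pvTokOf (n0 n1 n2 : Option Int) : Int :=
  match n0, n1, n2 with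
  | some a, some b, some c => c * 49 + b * 7 + a
  | _, _, _ => 343

-- one step of B's backward loop: state = (out so far, n1, n2)
def pvBStep (st : List Int × Option Int × Option Int) (ch : Char) :
    List Int × Option Int × Option Int :=
  (st.1 ++ [pvTokOf (pvChar2num.get? ch) st.2.1 st.2.2], pvChar2num.get? ch, st.2.1)

def proteinTokenizer_alt (seq : String) : List Int :=
  ((seq.toList.reverse.foldl pvBStep ([], none, none)).1).reverse

-- ===== PRECONDITION & SPEC =====
def Spec_proteinTokenizer (seq : String) (out : List Int) : Prop := out = proteinTokenizer_alt seq
instance (seq : String) (out : List Int) : Decidable (Spec_proteinTokenizer seq out) := by unfold Spec_proteinTokenizer; infer_instance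

-- ===== CLAIM =====
def Claim_equal_proteinTokenizer : Prop := ∀ (seq : String), Dom_proteinTokenizer seq → Spec_proteinTokenizer seq (proteinTokenizer seq)

-- ===== LEMMAS AND PROOFS =====

-- A's per-index value (Int index), exactly the loop body's appended element
def pvAElem (cs : List Char) (i : Int) : Int :=
  if i + 2 ≥ (cs.length : Int) ∨
     ¬((pvChar2num.get? (PySem.List.pyGetD cs i ' ')).isSome = true ∧
       (pvChar2num.get? (PySem.List.pyGetD cs (i+1) ' ')).isSome = true ∧
       (pvChar2num.get? (PySem.List.pyGetD cs (i+2) ' ')).isSome = true)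
  then 343
  else pvChar2num.getD (PySem.List.pyGetD cs (i+2) ' ') 0 * 49 +
       pvChar2num.getD (PySem.List.pyGetD cs (i+1) ' ') 0 * 7 +
       pvChar2num.getD (PySem.List.pyGetD cs i ' ') 0

theorem pvA_eq_map (seq : String) :
    proteinTokenizer seq = (List.range seq.toList.length).map (fun i : Nat => pvAElem seq.toList (i : Int)) := by
  unfold proteinTokenizer
  have hbody : (fun (out : List Int) (i : Int) =>
      if i + 2 ≥ (seq.toList.length : Int) ∨
         ¬((pvChar2num.get? (PySem.List.pyGetD seq.toList i ' ')).isSome = true ∧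
           (pvChar2num.get? (PySem.List.pyGetD seq.toList (i+1) ' ')).isSome = true ∧
           (pvChar2num.get? (PySem.List.pyGetD seq.toList (i+2) ' ')).isSome = true)
      then out ++ [343]
      else out ++ [pvChar2num.getD (PySem.List.pyGetD seq.toList (i+2) ' ') 0 * 49 +
                   pvChar2num.getD (PySem.List.pyGetD seq.toList (i+1) ' ') 0 * 7 +
                   pvChar2num.getD (PySem.List.pyGetD seq.toList i ' ') 0])
      = (fun (out : List Int) (i : Int) => out ++ [pvAElem seq.toList i]) := by
    funext out i
    unfold pvAElem
    split_ifs <;> rfl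
  rw [hbody, PySem.List.foldl_append_singleton_eq_map, PySem.List.pyRange_zero_natCast]
  simp [List.map_map]

-- shifting the index down one cons
theorem pvAElem_cons_succ (c : Char) (cs : List Char) (i : Nat) :
    pvAElem (c :: cs) ((i + 1 : Nat) : Int) = pvAElem cs (i : Int) := by
  unfold pvAElem
  rw [show (Nat.cast (i+1) : Int) + 1 = (Nat.cast (i+2) : Int) by push_cast; ring,
      show (Nat.cast (i+1) : Int) + 2 = (Nat.cast (i+3) : Int) by push_cast; ring,
      show (Nat.cast i : Int) + 1 = (Nat.cast (i+1) : Int) by push_cast; ring,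
      show (Nat.cast i : Int) + 2 = (Nat.cast (i+2) : Int) by push_cast; ring]
  simp only [PySem.List.pyGetD_natCast, List.length_cons]
  rw [show (i+3) = (i+2)+1 from rfl, show (i+2) = (i+1)+1 from rfl]
  simp only [List.getD_cons_succ]
  have hc : ((Nat.cast (i+1+1+1) : Int) ≥ (Nat.cast (cs.length+1) : Int)) ↔
      ((Nat.cast (i+1+1) : Int) ≥ (Nat.cast cs.length : Int)) := by push_cast; omega
  simp only [hc]

-- A-style token list, recursively characterised
theorem pvTok_cons (c : Char) (cs : List Char) :
    (List.range (c :: cs).length).map (fun i : Nat => pvAElem (c :: cs) (i : Int)) =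
      pvAElem (c :: cs) 0 ::
        (List.range cs.length).map (fun i : Nat => pvAElem cs (i : Int)) := by
  rw [List.length_cons, List.range_succ_eq_map]
  simp only [List.map_cons, List.map_map, Nat.cast_zero]
  congr 1
  apply List.map_congr_left
  intro i _
  simp only [Function.comp_apply, pvAElem_cons_succ]

-- B's fold over the reverse, one cons at a time
theorem pvG_cons (c : Char) (cs : List Char) :
    (c :: cs).reverse.foldl pvBStep ([], none, none) =
      pvBStep (cs.reverse.foldl pvBStep ([], none, none)) c := by
  rw [List.reverse_cons, List.foldl_append]
  rfl

-- the rolling registers hold the codes of the first two characters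
theorem pvG_regs (cs : List Char) :
    (cs.reverse.foldl pvBStep ([], none, none)).2.1 = cs.head?.bind (fun c => pvChar2num.get? c) ∧
    (cs.reverse.foldl pvBStep ([], none, none)).2.2 = (cs.drop 1).head?.bind (fun c => pvChar2num.get? c) := by
  induction cs with
  | nil => exact ⟨rfl, rfl⟩
  | cons c cs ih =>
    rw [pvG_cons]
    refine ⟨rfl, ?_⟩
    show (cs.reverse.foldl pvBStep ([], none, none)).2.1 = _
    rw [ih.1]
    cases cs <;> rfl

-- B's head token is A's index-0 element
theorem pvTok0 (c : Char) (cs : List Char) :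
    pvTokOf (pvChar2num.get? c)
        (cs.reverse.foldl pvBStep ([], none, none)).2.1
        (cs.reverse.foldl pvBStep ([], none, none)).2.2 = pvAElem (c :: cs) 0 := by
  obtain ⟨h1, h2⟩ := pvG_regs cs
  rw [h1, h2]
  match cs with
  | [] => cases h : pvChar2num.get? c <;> simp [pvAElem, pvTokOf, h]
  | [d] =>
    cases h : pvChar2num.get? c <;> cases h' : pvChar2num.get? d <;>
      simp [pvAElem, pvTokOf, h, h']
  | d :: e :: rest =>
    have g0 : PySem.List.pyGetD (c :: d :: e :: rest) (0:Int) ' ' = c :=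
      PySem.List.pyGetD_zero_cons c (d :: e :: rest) ' '
    have g1 : PySem.List.pyGetD (c :: d :: e :: rest) (1:Int) ' ' = d := by
      rw [show (1:Int) = ((1:Nat):Int) by norm_num, PySem.List.pyGetD_natCast]; rfl
    have g2 : PySem.List.pyGetD (c :: d :: e :: rest) (2:Int) ' ' = e := by
      rw [show (2:Int) = ((2:Nat):Int) by norm_num, PySem.List.pyGetD_natCast]; rfl
    cases h : pvChar2num.get? c <;> cases h' : pvChar2num.get? d <;>
      cases h'' : pvChar2num.get? e <;>
        simp [pvAElem, pvTokOf, g0, g1, g2, h, h', h'', PySem.Dict.getD]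

-- full equality on the character list
theorem pvMain (cs : List Char) :
    (List.range cs.length).map (fun i : Nat => pvAElem cs (i : Int)) =
      ((cs.reverse.foldl pvBStep ([], none, none)).1).reverse := by
  induction cs with
  | nil => rfl
  | cons c cs ih =>
    rw [pvTok_cons, pvG_cons]
    show _ = (_ ++ [pvTokOf _ _ _]).reverse
    rw [pvTok0, List.reverse_append, ih]
    rfl

-- ===== VERDICT =====
theorem proteinTokenizer_spec : Claim_equal_proteinTokenizer := by
  intro seq _
  show proteinTokenizer seq = proteinTokenizer_alt seq
  rw [pvA_eq_map, pvMain]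
  rfl
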